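-- pv_equiv track=rewrite | github.com/corlan-costello/my-usaco | beans/beads.py | collect_front
-- ===== SOURCE A (Python) =====
-- def collect_front(beads):
--     color = None
--     count = 0
--     for bead in beads:
--         if bead != 'w':
--             if color == None:
--                 color = bead
--             else:
--                 if bead != color:
--                     return count
--         count += 1
--     return len(beads)
-- ===== SOURCE B (Python) =====
-- def collect_front(beads):
--     color = next((b for b in beads if b != 'w'), None)
--     if color is None:
--         return len(beads)
--     count = 0
--     for bead in beads:
--         if bead == 'w' or bead == color:
--             count += 1
--         else:
--             break
--     return count
-- ===== Notes on version B (the rewrite author's own statement) =====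
-- stated objective: simpler
-- what changed: Replaced A's single inline state machine (optional color tracked alongside the count) with two plain passes: find the first non-white bead's color, then count the leading run of white-or-that-color beads.
import Mathlib
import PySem

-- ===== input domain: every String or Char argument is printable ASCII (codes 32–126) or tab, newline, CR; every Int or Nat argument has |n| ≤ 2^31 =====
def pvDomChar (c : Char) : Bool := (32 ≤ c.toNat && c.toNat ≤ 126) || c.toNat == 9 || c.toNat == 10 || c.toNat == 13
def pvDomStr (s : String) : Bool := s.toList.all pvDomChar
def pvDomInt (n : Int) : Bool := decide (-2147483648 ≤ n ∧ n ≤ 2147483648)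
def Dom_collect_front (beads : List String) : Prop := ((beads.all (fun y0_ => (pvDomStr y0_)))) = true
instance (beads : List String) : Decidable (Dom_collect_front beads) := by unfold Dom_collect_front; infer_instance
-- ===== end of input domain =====

-- B separates A's inline state machine into two passes: find the first non-white color, then count the leading run (objective: simpler).


-- ===== PORT A =====
-- A's loop: state (color : Option String, count); early return of count on a second color; n = len(beads) for the fall-through return.
def cfA_loop : List String → Option String → Int → Int → Int
  | [], _, _, n => n
  | b :: bs, color, count, n =>
    if b ≠ "w" then
      match color with
      | none => cfA_loop bs (some b) (count + 1) n
      | some c => if b ≠ c then count else cfA_loop bs (some c) (count + 1) n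
    else cfA_loop bs color (count + 1) n

def collect_front (beads : List String) : Int := cfA_loop beads none 0 (beads.length : Int)

-- ===== PORT B =====
-- first non-white bead, if any
def cfB_firstColor : List String → Option String
  | [] => none
  | b :: bs => if b ≠ "w" then some b else cfB_firstColor bs

-- leading run of beads that are white or the given color
def cfB_run : List String → String → Int
  | [], _ => 0
  | b :: bs, c => if b = "w" ∨ b = c then 1 + cfB_run bs c else 0

def collect_front_alt (beads : List String) : Int :=
  match cfB_firstColor beads with
  | none => (beads.length : Int)
  | some c => cfB_run beads c

-- ===== PRECONDITION & SPEC =====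
def Spec_collect_front (beads : List String) (out : Int) : Prop := out = collect_front_alt beads
instance (beads : List String) (out : Int) : Decidable (Spec_collect_front beads out) := by unfold Spec_collect_front; infer_instance

-- ===== CLAIM (what is proved, stated in full; the proofs are below) =====
def Claim_equal_collect_front : Prop := ∀ (beads : List String), Dom_collect_front beads → Spec_collect_front beads (collect_front beads)

-- ===== LEMMAS AND PROOFS =====
theorem cfA_loop_some (bs : List String) (c : String) :
    ∀ count : Int, cfA_loop bs (some c) count (count + (bs.length : Int)) = count + cfB_run bs c := by
  induction bs with
  | nil => intro count; simp [cfA_loop, cfB_run]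
  | cons b bs ih =>
    intro count
    by_cases hw : b = "w"
    · subst hw
      have h := ih (count + 1)
      simp [cfA_loop, cfB_run]
      have : count + ((bs.length : Int) + 1) = count + 1 + (bs.length : Int) := by ring
      rw [this, h]; ring
    · by_cases hc : b = c
      · subst hc
        have h := ih (count + 1)
        simp [cfA_loop, cfB_run, hw]
        have : count + ((bs.length : Int) + 1) = count + 1 + (bs.length : Int) := by ring
        rw [this, h]; ring
      · simp [cfA_loop, cfB_run, hw, hc]

theorem cfA_loop_none (bs : List String) :
    ∀ count : Int, cfA_loop bs none count (count + (bs.length : Int)) =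
      count + (match cfB_firstColor bs with
               | none => (bs.length : Int)
               | some c => cfB_run bs c) := by
  induction bs with
  | nil => intro count; simp [cfA_loop, cfB_firstColor]
  | cons b bs ih =>
    intro count
    by_cases hw : b = "w"
    · subst hw
      have h := ih (count + 1)
      simp only [cfA_loop, cfB_firstColor, List.length_cons, if_neg (by simp : ¬ ("w" ≠ "w"))]
      have he : count + (((bs.length : Int)) + 1) = count + 1 + (bs.length : Int) := by ring
      rw [show ((bs.length + 1 : ℕ) : Int) = (bs.length : Int) + 1 by omega, he, h]
      cases cfB_firstColor bs with
      | none => simp [cfB_run]; ring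
      | some c => simp only [cfB_run]; simp; ring
    · have h := cfA_loop_some bs b (count + 1)
      simp only [cfA_loop, cfB_firstColor, List.length_cons, if_pos hw]
      rw [show ((bs.length + 1 : ℕ) : Int) = (bs.length : Int) + 1 by omega,
          show count + ((bs.length : Int) + 1) = count + 1 + (bs.length : Int) by ring, h]
      simp [cfB_run, hw]
      ring

-- ===== VERDICT (by name: the statement is the Claim_ definition above) =====
theorem collect_front_spec : Claim_equal_collect_front := by
  intro beads _
  unfold Spec_collect_front collect_front collect_front_alt
  have h := cfA_loop_none beads 0
  simp only [zero_add] at h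
  rw [h]
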